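-- pv_equiv track=rewrite | github.com/nicolasthreatt/data-structures-and-algos | daily-coding-problem/2023/July/max_money.py | max_money
-- ===== SOURCE A (Python) =====
-- def max_money(coins):
--     """
--     Returns the maximum amount of money you can win with certainty,
--     if you move first, assuming your opponent plays optimally.
--     """
--
--     # Base cases
--     if not coins:
--         return 0
--     if len(coins) == 1:
--         return coins[0]
--     if len(coins) == 2:
--         return max(coins)
--
--     # Recursive cases
--     # If you take the first coin, your opponent can take either the first or last coin
--     # If you take the last coin, your opponent can take either the first or last coin
--     first_coin_move = coins[0] + min(max_money(coins[2:]), max_money(coins[1:-1]))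
--     last_coin_move = coins[-1] + min(max_money(coins[1:-1]), max_money(coins[:-2]))
--
--     # Return the maximum of the two possible moves
--     return max(first_coin_move, last_coin_move)
-- ===== SOURCE B (Python) =====
-- def max_money(coins):
--     """
--     Returns the maximum amount of money you can win with certainty,
--     if you move first, assuming your opponent plays optimally.
--     """
--     n = len(coins)
--     if n == 0:
--         return 0
--     # row[i] = answer for the window of length L starting at index i.
--     # The recurrence only uses windows shorter by exactly 2, so we step L by 2
--     # from the base row matching n's parity.
--     if n % 2 == 1:
--         row = list(coins)
--         L = 1
--     else:
--         row = [max(coins[i], coins[i + 1]) for i in range(n - 1)]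
--         L = 2
--     while L < n:
--         L += 2
--         row = [max(coins[i] + min(row[i + 2], row[i + 1]),
--                    coins[i + L - 1] + min(row[i + 1], row[i]))
--                for i in range(n - L + 1)]
--     return row[0]
-- ===== Notes on version B (the rewrite author's own statement) =====
-- stated objective: faster
-- what changed: Replaced A's exponential four-branch recursion on list slices by a bottom-up interval DP that keeps a single row of window values and grows the window length by 2 each pass (the recurrence only consults windows shorter by exactly 2).
import Mathlib
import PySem

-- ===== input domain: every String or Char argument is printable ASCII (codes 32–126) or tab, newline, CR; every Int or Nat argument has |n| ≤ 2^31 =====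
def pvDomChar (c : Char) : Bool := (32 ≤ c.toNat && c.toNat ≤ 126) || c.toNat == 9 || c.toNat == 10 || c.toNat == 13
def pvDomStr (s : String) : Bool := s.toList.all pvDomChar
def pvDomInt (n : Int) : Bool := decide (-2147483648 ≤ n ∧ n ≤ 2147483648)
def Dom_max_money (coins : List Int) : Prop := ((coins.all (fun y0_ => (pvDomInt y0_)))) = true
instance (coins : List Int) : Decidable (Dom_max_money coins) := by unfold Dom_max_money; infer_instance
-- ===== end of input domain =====

-- B replaces A's exponential four-way recursion on slices by a bottom-up interval DP
-- keeping one row of window values and stepping the window length by 2 (alternative/faster).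

-- ===== PORT A =====
-- length/shape facts about the three slices, cited by the port's decreasing_by
theorem pv_len_slice_from2 (xs : List Int) :
    (PySem.List.slice xs (some 2) none).length = xs.length - 2 := by
  simp [PySem.List.slice, PySem.List.clampIdx]
  omega

theorem pv_len3 (coins : List Int) (h0 : ¬ coins = []) (h1 : ¬ coins.length = 1)
    (h2 : ¬ coins.length = 2) : 3 ≤ coins.length := by
  have : coins.length ≠ 0 := fun e => h0 (List.eq_nil_of_length_eq_zero e)
  omega

theorem pv_slice_mid (xs : List Int) (h : 3 ≤ xs.length) :
    PySem.List.slice xs (some 1) (some (-1)) = (xs.drop 1).take (xs.length - 2) := by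
  have hne : xs ≠ [] := by intro e; simp [e] at h
  simp [PySem.List.slice, PySem.List.clampIdx, hne, Nat.min_eq_left (by omega : 1 ≤ xs.length)]
  congr 1
  omega

theorem pv_slice_to2 (xs : List Int) :
    PySem.List.slice xs none (some (-2)) = xs.take (xs.length - 2) :=
  PySem.List.slice_to_neg_ofNat xs 2 (by norm_num)

def max_money (coins : List Int) : Int :=
  if h0 : coins = [] then 0
  else if h1 : coins.length = 1 then PySem.List.pyGetD coins 0 0
  else if h2 : coins.length = 2 then (PySem.List.max? coins (fun y => y)).getD 0
  else
    let first_coin_move :=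
      PySem.List.pyGetD coins 0 0 +
        min (max_money (PySem.List.slice coins (some 2) none))
            (max_money (PySem.List.slice coins (some 1) (some (-1))))
    let last_coin_move :=
      PySem.List.pyGetD coins (-1) 0 +
        min (max_money (PySem.List.slice coins (some 1) (some (-1))))
            (max_money (PySem.List.slice coins none (some (-2))))
    max first_coin_move last_coin_move
termination_by coins.length
decreasing_by
  all_goals
    have h3 := pv_len3 coins h0 h1 h2
    first
      | (have := pv_len_slice_from2 coins; omega)
      | (rw [pv_slice_mid coins h3]; simp; omega)
      | (rw [pv_slice_to2 coins]; simp; omega)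

-- ===== PORT B =====
-- one DP step: from the row of length-(L-2) windows to the row of length-L windows
def bStep (coins row : List Int) (L : Int) : List Int :=
  (PySem.List.pyRange 0 ((coins.length : Int) - L + 1) 1).map (fun i =>
    max (PySem.List.pyGetD coins i 0 +
           min (PySem.List.pyGetD row (i + 2) 0) (PySem.List.pyGetD row (i + 1) 0))
        (PySem.List.pyGetD coins (i + L - 1) 0 +
           min (PySem.List.pyGetD row (i + 1) 0) (PySem.List.pyGetD row i 0)))

-- the 'while L < n' loop; fuel only bounds the iteration count for termination
def bLoop (coins : List Int) : List Int → Int → Nat → List Int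
  | row, _, 0 => row
  | row, L, f + 1 =>
    if L < (coins.length : Int) then bLoop coins (bStep coins row (L + 2)) (L + 2) f else row

def max_money_alt (coins : List Int) : Int :=
  let n := coins.length
  if n = 0 then 0
  else
    let init : List Int × Int :=
      if PySem.Int.mod (n : Int) 2 = 1 then (coins, 1)
      else ((PySem.List.pyRange 0 ((n : Int) - 1) 1).map (fun i =>
              max (PySem.List.pyGetD coins i 0) (PySem.List.pyGetD coins (i + 1) 0)), 2)
    PySem.List.pyGetD (bLoop coins init.1 init.2 n) 0 0

-- ===== PRECONDITION & SPEC =====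
def Spec_max_money (coins : List Int) (out : Int) : Prop := out = max_money_alt coins
instance (coins : List Int) (out : Int) : Decidable (Spec_max_money coins out) := by unfold Spec_max_money; infer_instance

-- ===== CLAIM (what is proved, stated in full; the proofs are below) =====
def Claim_equal_max_money : Prop := ∀ (coins : List Int), Dom_max_money coins → Spec_max_money coins (max_money coins)

-- ===== LEMMAS AND PROOFS =====

theorem pv_slice_from2 (xs : List Int) : PySem.List.slice xs (some 2) none = xs.drop 2 := by
  simp [PySem.List.slice, PySem.List.clampIdx]
  rcases Nat.le_total 2 xs.length with h | h
  · rw [Nat.min_eq_left h]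
    exact List.take_of_length_le (by simp)
  · rw [Nat.min_eq_right h]
    simp [List.drop_eq_nil_iff]
    omega


theorem mm_nil : max_money [] = 0 := by simp [max_money]

theorem mm_single (a : Int) : max_money [a] = a := by
  simp [max_money, PySem.List.pyGetD_zero_cons]

theorem mm_pair (a b : Int) : max_money [a, b] = max a b := by
  simp [max_money, PySem.List.max?_id_cons]

theorem mm_rec (c : List Int) (h : 3 ≤ c.length) (hne : c ≠ []) :
    max_money c =
      max (PySem.List.pyGetD c 0 0 +
            min (max_money (c.drop 2)) (max_money ((c.drop 1).take (c.length - 2))))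
          (c.getLast hne +
            min (max_money ((c.drop 1).take (c.length - 2))) (max_money (c.take (c.length - 2)))) := by
  conv_lhs => rw [max_money]
  rw [dif_neg hne, dif_neg (by omega : ¬ c.length = 1), dif_neg (by omega : ¬ c.length = 2)]
  simp only [pv_slice_from2, pv_slice_mid c h, pv_slice_to2, PySem.List.pyGetD_neg_one c 0 hne]

-- the row of DP values: rowSpec coins L = [A's answer for each window of length L]
def rowSpec (coins : List Int) (L : Nat) : List Int :=
  (List.range (coins.length - L + 1)).map (fun i => max_money ((coins.drop i).take L))

theorem pyGetD_rowSpec (coins : List Int) (M j : Nat) (hj : j < coins.length - M + 1) :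
    PySem.List.pyGetD (rowSpec coins M) (j : Int) 0 = max_money ((coins.drop j).take M) := by
  rw [PySem.List.pyGetD_natCast]
  rw [rowSpec, List.getD_eq_getElem _ _ (by simpa using hj)]
  simp

theorem bStep_rowSpec (coins : List Int) (L : Nat) (h3 : 3 ≤ L) (hLn : L ≤ coins.length) :
    bStep coins (rowSpec coins (L - 2)) (L : Int) = rowSpec coins L := by
  apply List.ext_getElem
  · simp [bStep, rowSpec, PySem.List.pyRange_one]
    omega
  · intro k hk1 hk2
    have hk : k < coins.length - L + 1 := by simpa [rowSpec] using hk2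
    simp only [bStep, PySem.List.pyRange_one, List.map_map, List.getElem_map,
      List.getElem_range, Function.comp]
    have cast2 : (0 + (k:Int) + 2) = ((k + 2 : Nat) : Int) := by omega
    have cast1 : (0 + (k:Int) + 1) = ((k + 1 : Nat) : Int) := by omega
    have cast0 : (0 + (k:Int)) = ((k : Nat) : Int) := by omega
    have castL : ((k:Int) + (L:Int) - 1) = ((k + (L - 1) : Nat) : Int) := by
      push_cast [Nat.cast_sub (by omega : 1 ≤ L)]; ring
    rw [cast2, cast1, cast0, castL]
    rw [pyGetD_rowSpec coins (L-2) (k+2) (by omega), pyGetD_rowSpec coins (L-2) (k+1) (by omega),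
        pyGetD_rowSpec coins (L-2) k (by omega),
        PySem.List.pyGetD_natCast coins, PySem.List.pyGetD_natCast coins]
    -- right-hand side: expand A's recursion on the window c
    set c := (coins.drop k).take L with hc
    have hclen : c.length = L := by simp [hc]; omega
    have hcne : c ≠ [] := by
      intro e; rw [e] at hclen; simp at hclen; omega
    simp only [rowSpec, List.getElem_map, List.getElem_range]
    rw [← hc, mm_rec c (by omega) hcne]
    have w2 : c.drop 2 = (coins.drop (k+2)).take (L-2) := by
      rw [hc, List.drop_take, List.drop_drop]
    have wmid : (c.drop 1).take (c.length - 2) = (coins.drop (k+1)).take (L-2) := by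
      rw [hclen, hc, List.drop_take, List.drop_drop, List.take_take]
      congr 1
      omega
    have wtake : c.take (c.length - 2) = (coins.drop k).take (L-2) := by
      rw [hclen, hc, List.take_take]
      congr 1
      omega
    have hc0 : PySem.List.pyGetD c 0 0 = coins.getD k 0 := by
      rw [PySem.List.pyGetD_zero, hc]
      rw [List.getD_eq_getElem _ _ (by simp; omega), List.getD_eq_getElem _ _ (by omega)]
      simp [List.getElem_take, List.getElem_drop]
    have hlast : c.getLast hcne = coins.getD (k + (L-1)) 0 := by
      rw [List.getLast_eq_getElem, List.getD_eq_getElem _ _ (by omega)]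
      simp only [hc, List.getElem_take, List.getElem_drop, List.length_take, List.length_drop]
      congr 1
      omega
    rw [w2, wmid, wtake, hc0, hlast]

theorem bLoop_rowSpec (coins : List Int) (fuel L : Nat) (h1 : 1 ≤ L) (hLn : L ≤ coins.length)
    (hpar : (coins.length - L) % 2 = 0) (hfuel : coins.length - L ≤ 2 * fuel) :
    bLoop coins (rowSpec coins L) (L : Int) fuel = rowSpec coins coins.length := by
  induction fuel generalizing L with
  | zero =>
    have hLe : L = coins.length := by omega
    rw [bLoop, hLe]
  | succ f ih =>
    rw [bLoop]
    by_cases hL : (L : Int) < (coins.length : Int)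
    · rw [if_pos hL]
      have hL' : L < coins.length := by exact_mod_cast hL
      have hL2 : L + 2 ≤ coins.length := by omega
      have hcast : (L : Int) + 2 = ((L + 2 : Nat) : Int) := by push_cast; ring
      rw [hcast, show rowSpec coins L = rowSpec coins (L + 2 - 2) by norm_num,
          bStep_rowSpec coins (L + 2) (by omega) hL2]
      exact ih (L + 2) (by omega) hL2 (by omega) (by omega)
    · rw [if_neg hL]
      have : L = coins.length := by
        have : (coins.length : Int) ≤ (L : Int) := by omega
        omega
      rw [this]

theorem rowSpec_one (coins : List Int) (h : 1 ≤ coins.length) : rowSpec coins 1 = coins := by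
  apply List.ext_getElem
  · simp [rowSpec]; omega
  · intro i hi1 hi2
    simp only [rowSpec, List.getElem_map, List.getElem_range]
    have : (coins.drop i).take 1 = [coins[i]] := by
      rw [List.drop_eq_getElem_cons (by omega : i < coins.length), List.take_succ_cons,
          List.take_zero]
    rw [this, mm_single]

theorem rowSpec_two (coins : List Int) (h : 2 ≤ coins.length) :
    rowSpec coins 2 =
      (PySem.List.pyRange 0 ((coins.length : Int) - 1) 1).map (fun i =>
        max (PySem.List.pyGetD coins i 0) (PySem.List.pyGetD coins (i + 1) 0)) := by
  apply List.ext_getElem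
  · simp [rowSpec, PySem.List.pyRange_one]
    omega
  · intro k hk1 hk2
    have hk : k + 1 < coins.length := by
      simp [rowSpec] at hk1; omega
    simp only [rowSpec, PySem.List.pyRange_one, List.map_map, List.getElem_map,
      List.getElem_range, Function.comp]
    have cast1 : (0 + (k:Int) + 1) = ((k + 1 : Nat) : Int) := by omega
    have cast0 : (0 + (k:Int)) = ((k : Nat) : Int) := by omega
    rw [cast1, cast0, PySem.List.pyGetD_natCast, PySem.List.pyGetD_natCast,
        List.getD_eq_getElem _ _ (by omega), List.getD_eq_getElem _ _ (by omega)]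
    have : (coins.drop k).take 2 = [coins[k], coins[k+1]] := by
      rw [List.drop_eq_getElem_cons (by omega : k < coins.length), List.take_succ_cons,
          List.drop_eq_getElem_cons (by omega : k + 1 < coins.length), List.take_succ_cons,
          List.take_zero]
    rw [this, mm_pair]

theorem rowSpec_full (coins : List Int) : rowSpec coins coins.length = [max_money coins] := by
  simp [rowSpec]

-- ===== VERDICT (by name: the statement is the Claim_ definition above) =====
theorem max_money_spec : Claim_equal_max_money := by
  intro coins _
  unfold Spec_max_money max_money_alt
  by_cases h0 : coins.length = 0
  · have : coins = [] := List.eq_nil_of_length_eq_zero h0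
    simp [this, mm_nil]
  · rw [if_neg h0]
    by_cases hodd : PySem.Int.mod ((coins.length : Nat) : Int) 2 = 1
    · rw [if_pos hodd]
      have hpar : coins.length % 2 = 1 := by
        have h2 := PySem.Int.mod_natCast coins.length 2
        rw [show ((2:Nat):Int) = 2 from rfl] at h2
        rw [h2] at hodd
        exact_mod_cast hodd
      have hrun := bLoop_rowSpec coins coins.length 1 (by omega) (by omega) (by omega) (by omega)
      rw [rowSpec_one coins (by omega)] at hrun
      rw [show ((1:Nat):Int) = 1 from rfl] at hrun
      show max_money coins = PySem.List.pyGetD (bLoop coins coins 1 coins.length) 0 0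
      rw [hrun, rowSpec_full, PySem.List.pyGetD_zero_cons]
    · rw [if_neg hodd]
      have hpar : coins.length % 2 = 0 := by
        have h2 := PySem.Int.mod_natCast coins.length 2
        rw [show ((2:Nat):Int) = 2 from rfl] at h2
        rw [h2] at hodd
        have : coins.length % 2 ≠ 1 := fun e => hodd (by exact_mod_cast e)
        omega
      have hn2 : 2 ≤ coins.length := by omega
      rw [← rowSpec_two coins hn2]
      have hrun := bLoop_rowSpec coins coins.length 2 (by omega) hn2 (by omega) (by omega)
      rw [show ((2:Nat):Int) = 2 from rfl] at hrun
      show max_money coins = PySem.List.pyGetD (bLoop coins (rowSpec coins 2) 2 coins.length) 0 0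
      rw [hrun, rowSpec_full, PySem.List.pyGetD_zero_cons]
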